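-- pv_equiv track=rewrite | github.com/Ananth1-9/CSC-110 | Programming projects/benfords_law.py | count_start_digits
-- ===== SOURCE A (Python) =====
-- def count_start_digits(list_digits):
--     """
--     Counts the occurrences of the first non-zero digit (1-9) for each
--     number string in the list.
--
--     Args:
--         list_digits (list): A list of strings representing numbers.
--     Returns:
--         dict: A dictionary with keys 1-9 and their corresponding counts.
--     """
--     dictionary_count = {1: 0, 2: 0, 3: 0 , 4: 0, 5: 0, 6: 0, 7: 0, 8: 0, 9: 0}
--
--     # Loop through each number string in the list
--     for num_str in list_digits:
--         if num_str:
--             for char in num_str: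
--                 if char.isdigit() and char != '0':
--                     dictionary_count[int(char)] += 1
--                     break
--     return dictionary_count
-- ===== SOURCE B (Python) =====
-- def count_start_digits(list_digits):
--     """Digit-major re-implementation: for each string, run nine substring
--     searches s.find('1')..s.find('9') and take the digit whose first
--     occurrence is leftmost (argmin of find positions), instead of scanning
--     the string character by character."""
--     result = {}
--     for d in range(1, 10):
--         result[d] = 0
--     for num_str in list_digits:
--         best_d = 0
--         best_p = -1
--         for d in range(1, 10):
--             p = num_str.find(chr(48 + d))
--             if p != -1 and (best_p == -1 or p < best_p):
--                 best_d = d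
--                 best_p = p
--         if best_d != 0:
--             result[best_d] += 1
--     return result
-- ===== Notes on version B (the rewrite author's own statement) =====
-- stated objective: alternative
-- what changed: A scans each string character by character with a break; B is digit-major: per string it runs nine substring searches find('1')..find('9') and counts the digit whose first occurrence is leftmost (argmin of find positions), over a dict seeded by a separate range loop.
import Mathlib
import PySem

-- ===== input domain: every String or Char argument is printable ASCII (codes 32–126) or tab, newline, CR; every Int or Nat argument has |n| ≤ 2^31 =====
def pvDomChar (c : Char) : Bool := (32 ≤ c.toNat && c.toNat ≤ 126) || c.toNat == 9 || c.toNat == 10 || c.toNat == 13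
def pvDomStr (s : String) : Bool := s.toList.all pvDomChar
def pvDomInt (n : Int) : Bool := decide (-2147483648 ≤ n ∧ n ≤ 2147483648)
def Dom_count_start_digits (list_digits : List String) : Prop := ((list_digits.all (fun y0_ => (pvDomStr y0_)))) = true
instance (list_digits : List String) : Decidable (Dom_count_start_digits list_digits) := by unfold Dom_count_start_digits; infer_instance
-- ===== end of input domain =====

-- B is digit-major instead of character-major: per string it runs nine substring
-- searches find('1')..find('9') and takes the digit with the leftmost hit (alternative).

-- ===== PORT A =====
-- inner 'for char in num_str: … break' loop; int(char) under the digit guard is c.toNat - 48,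
-- and d[k] += 1 is exact as getD+insert because keys 1..9 are always present.
def csdInner (d : PySem.Dict Int Int) : List Char → PySem.Dict Int Int
  | [] => d
  | c :: rest =>
    if PySem.Chars.isdigit c && !(c == '0') then
      d.insert ((c.toNat : Int) - 48) (d.getD ((c.toNat : Int) - 48) 0 + 1)
    else csdInner d rest

def count_start_digits (list_digits : List String) : List (Int × Int) :=
  (list_digits.foldl
    (fun d num_str => if num_str ≠ "" then csdInner d num_str.toList else d)
    (PySem.Dict.ofList [(1,0),(2,0),(3,0),(4,0),(5,0),(6,0),(7,0),(8,0),(9,0)])).items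

-- ===== PORT B =====
-- inner 'for d in range(1, 10): p = num_str.find(chr(48 + d)); if …' loop, state (best_d, best_p)
def csdBestStep (num_str : String) (st : Int × Int) (d : Int) : Int × Int :=
  let p := PySem.Str.find num_str (String.singleton (Char.ofNat (48 + d).toNat))
  if p ≠ -1 ∧ (st.2 = -1 ∨ p < st.2) then (d, p) else st

-- result[best_d] += 1 is exact as getD+insert because keys 1..9 are seeded first.
def count_start_digits_alt (list_digits : List String) : List (Int × Int) :=
  let result := (PySem.List.pyRange 1 10 1).foldl (fun r d => r.insert d 0) (PySem.Dict.mk [])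
  (list_digits.foldl
    (fun r num_str =>
      let best := (PySem.List.pyRange 1 10 1).foldl (csdBestStep num_str) (0, -1)
      if best.1 ≠ 0 then r.insert best.1 (r.getD best.1 0 + 1) else r)
    result).items

-- ===== PRECONDITION & SPEC =====
def Spec_count_start_digits (list_digits : List String) (out : List (Int × Int)) : Prop := out = count_start_digits_alt list_digits
instance (list_digits : List String) (out : List (Int × Int)) : Decidable (Spec_count_start_digits list_digits out) := by unfold Spec_count_start_digits; infer_instance

-- ===== CLAIM (what is proved, stated in full; the proofs are below) =====
def Claim_equal_count_start_digits : Prop := ∀ (list_digits : List String), Dom_count_start_digits list_digits → Spec_count_start_digits list_digits (count_start_digits list_digits)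

-- ===== LEMMAS AND PROOFS =====

-- the significant-digit predicate both programs are about
def sig (c : Char) : Bool := decide ('1' ≤ c) && decide (c ≤ '9')

lemma charToNat_inj (a b : Char) : a.toNat = b.toNat ↔ a = b := eq_iff_eq_of_cmp_eq_cmp rfl

lemma sig_iff (c : Char) : sig c = true ↔ 49 ≤ c.toNat ∧ c.toNat ≤ 57 := by
  unfold sig
  simp only [Bool.and_eq_true, decide_eq_true_eq, Char.le_def, UInt32.le_iff_toNat_le]
  exact Iff.rfl

lemma predEq (c : Char) :
    (PySem.Chars.isdigit c && !(c == '0')) = sig c := by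
  have e0 : (c == '0') = decide (c.toNat = 48) := by
    rw [Bool.beq_eq_decide_eq]
    exact decide_eq_decide.mpr (by rw [← charToNat_inj]; exact Iff.rfl)
  have e1 : decide ('0' ≤ c) = decide (48 ≤ c.toNat) :=
    decide_eq_decide.mpr (by rw [Char.le_def, UInt32.le_iff_toNat_le]; exact Iff.rfl)
  have e2 : decide (c ≤ '9') = decide (c.toNat ≤ 57) :=
    decide_eq_decide.mpr (by rw [Char.le_def, UInt32.le_iff_toNat_le]; exact Iff.rfl)
  have e3 : decide ('1' ≤ c) = decide (49 ≤ c.toNat) :=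
    decide_eq_decide.mpr (by rw [Char.le_def, UInt32.le_iff_toNat_le]; exact Iff.rfl)
  unfold PySem.Chars.isdigit sig
  rw [e0, e1, e2, e3]
  by_cases a : 48 ≤ c.toNat <;> by_cases b : c.toNat ≤ 57 <;> by_cases d : c.toNat = 48 <;>
    simp [a, b, d] <;> omega

-- A's inner loop is 'find the first significant char and bump its digit'
lemma csdInner_eq (l : List Char) (d : PySem.Dict Int Int) :
    csdInner d l =
      match l.find? sig with
      | some c => d.insert ((c.toNat : Int) - 48) (d.getD ((c.toNat : Int) - 48) 0 + 1)
      | none => d := by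
  induction l with
  | nil => rfl
  | cons c rest ih =>
    rw [csdInner, predEq, List.find?]
    by_cases h : sig c = true <;> simp [h, ih]

-- [e] is a prefix of l.drop j iff l[j]? = some e
lemma singleton_prefix_drop (l : List Char) (j : Nat) (e : Char) :
    ([e] <+: l.drop j) ↔ l[j]? = some e := by
  rw [← List.head?_drop]
  cases h : l.drop j with
  | nil => simp
  | cons x xs => simp [List.cons_prefix_cons, eq_comm]

-- find l [e] = -1 iff e is not in l
lemma find_singleton_neg (l : List Char) (e : Char) :
    PySem.Chars.find l [e] = -1 ↔ e ∉ l := by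
  rw [PySem.Chars.find_eq_neg_one_iff]
  constructor
  · intro h hm
    rcases List.append_of_mem hm with ⟨s, t, rfl⟩
    exact h ⟨s, t, by simp⟩
  · intro h hin
    rcases hin with ⟨s, t, rfl⟩
    exact h (by simp)

-- characterization of find l [e] when it returns an index
lemma find_singleton_spec (l : List Char) (e : Char) (h : PySem.Chars.find l [e] ≠ -1) :
    0 ≤ PySem.Chars.find l [e] ∧
    l[(PySem.Chars.find l [e]).toNat]? = some e ∧
    ∀ j < (PySem.Chars.find l [e]).toNat, l[j]? ≠ some e := by
  have h0 : 0 ≤ PySem.Chars.find l [e] := by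
    have := PySem.Chars.neg_one_le_find (s := l) (sub := [e])
    omega
  obtain ⟨h1, h2⟩ := PySem.Chars.find_spec (s := l) (sub := [e]) h0
  refine ⟨h0, (singleton_prefix_drop _ _ _).mp h1, fun j hj hget => ?_⟩
  exact h2 j hj ((singleton_prefix_drop _ _ _).mpr hget)

-- abbreviation for B's per-string position of digit d
def pd (s : String) (d : Int) : Int :=
  PySem.Str.find s (String.singleton (Char.ofNat (48 + d).toNat))

lemma csdBestStep_eq (s : String) (st : Int × Int) (d : Int) :
    csdBestStep s st d = if pd s d ≠ -1 ∧ (st.2 = -1 ∨ pd s d < st.2) then (d, pd s d) else st := rfl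


-- the search character of digit d, for d in 1..9
lemma digitChar_facts (d : Int) (hd : 1 ≤ d ∧ d ≤ 9) :
    ((Char.ofNat (48 + d).toNat).toNat : Int) = 48 + d ∧
      sig (Char.ofNat (48 + d).toNat) = true := by
  obtain ⟨h1, h2⟩ := hd
  interval_cases d <;> exact ⟨by decide, by decide⟩

lemma ofNat_toNat_char (c : Char) (h : c.toNat ≤ 57) : Char.ofNat c.toNat = c := by
  rw [← charToNat_inj, Char.toNat_ofNat, if_pos (Or.inl (by omega))]

-- when no char of the string is significant, every digit search misses and the loop is a no-op
lemma bestFold_none (s : String) (h : s.toList.find? sig = none)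
    (ds : List Int) (hds : ∀ d ∈ ds, (1:Int) ≤ d ∧ d ≤ 9) :
    ds.foldl (csdBestStep s) (0, -1) = (0, -1) := by
  induction ds with
  | nil => rfl
  | cons d rest ih =>
    have hd := hds d (by simp)
    have hmiss : pd s d = -1 := by
      unfold pd
      rw [PySem.Str.find_eq]
      simp only [String.toList_singleton]
      rw [find_singleton_neg]
      intro hmem
      have := List.find?_eq_none.mp h _ hmem
      rw [(digitChar_facts d hd).2] at this
      exact absurd this (by simp)
    rw [List.foldl_cons, csdBestStep_eq, if_neg (by simp [hmiss])]
    exact ih (fun e he => hds e (by simp [he]))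

-- helper facts in the 'some' case: c at index i is the first significant char
-- pd of c's own digit is exactly i, every other digit's pd is -1 or > i
lemma pd_own (s : String) (c : Char) (i : Nat) (hc : sig c = true)
    (hi : s.toList[i]? = some c) (hmin : ∀ j < i, ∀ x, s.toList[j]? = some x → sig x = false) :
    pd s ((c.toNat : Int) - 48) = (i : Int) := by
  have hle : c.toNat ≤ 57 := ((sig_iff c).mp hc).2
  have hge : 49 ≤ c.toNat := ((sig_iff c).mp hc).1
  have hchar : Char.ofNat (48 + ((c.toNat : Int) - 48)).toNat = c := by
    have : (48 + ((c.toNat : Int) - 48)).toNat = c.toNat := by omega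
    rw [this]; exact ofNat_toNat_char c hle
  unfold pd
  rw [PySem.Str.find_eq]
  simp only [String.toList_singleton, hchar]
  have hne : PySem.Chars.find s.toList [c] ≠ -1 := fun hn =>
    (find_singleton_neg s.toList c).mp hn (List.mem_of_getElem? hi)
  obtain ⟨h0, hget, hfirst⟩ := find_singleton_spec s.toList c hne
  set f := PySem.Chars.find s.toList [c] with hf
  have h1 : ¬ f.toNat < i := by
    intro hlt
    have := hmin f.toNat hlt c hget
    rw [hc] at this; exact absurd this (by simp)
  have h2 : ¬ i < f.toNat := fun hlt => hfirst i hlt hi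
  have : f.toNat = i := by omega
  omega

lemma pd_other (s : String) (c : Char) (i : Nat) (_hc : sig c = true)
    (hi : s.toList[i]? = some c) (hmin : ∀ j < i, ∀ x, s.toList[j]? = some x → sig x = false)
    (d : Int) (hd : 1 ≤ d ∧ d ≤ 9) (hne : d ≠ (c.toNat : Int) - 48) :
    pd s d = -1 ∨ (i : Int) < pd s d := by
  obtain ⟨htn, hsig⟩ := digitChar_facts d hd
  set e := Char.ofNat (48 + d).toNat with he
  unfold pd
  rw [PySem.Str.find_eq]
  simp only [String.toList_singleton, ← he]
  by_cases hn : PySem.Chars.find s.toList [e] = -1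
  · exact Or.inl hn
  · right
    obtain ⟨h0, hget, _⟩ := find_singleton_spec s.toList e hn
    set f := PySem.Chars.find s.toList [e] with hf
    have hec : e ≠ c := by
      intro heq
      apply hne
      have : (e.toNat : Int) = (c.toNat : Int) := by rw [heq]
      omega
    have h1 : ¬ f.toNat < i := by
      intro hlt
      have := hmin f.toNat hlt e hget
      rw [hsig] at this; exact absurd this (by simp)
    have h2 : f.toNat ≠ i := by
      intro heq
      rw [heq, hi] at hget
      exact hec (Option.some.inj hget).symm
    omega

-- once the winner is installed, later steps keep it
lemma bestFold_absorb (s : String) (dc : Int) (i : Nat)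
    (ds : List Int) (hds : ∀ d ∈ ds, pd s d = -1 ∨ (i : Int) ≤ pd s d) :
    ds.foldl (csdBestStep s) (dc, (i : Int)) = (dc, (i : Int)) := by
  induction ds with
  | nil => rfl
  | cons d rest ih =>
    have hd := hds d (by simp)
    rw [List.foldl_cons, csdBestStep_eq, if_neg]
    · exact ih (fun e he => hds e (by simp [he]))
    · rintro ⟨hne, h2 | h2⟩
      · omega
      · rcases hd with h | h
        · exact hne h
        · omega

-- dc's own step installs (dc, i), which then persists
lemma bestFold_wins (s : String) (dc : Int) (i : Nat)
    (ds : List Int) (hmem : dc ∈ ds) (hown : pd s dc = (i : Int))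
    (hother : ∀ d ∈ ds, d ≠ dc → pd s d = -1 ∨ (i : Int) < pd s d)
    (st : Int × Int) (hst : st = (0, -1) ∨ (i : Int) < st.2) :
    ds.foldl (csdBestStep s) st = (dc, (i : Int)) := by
  induction ds generalizing st with
  | nil => exact absurd hmem (by simp)
  | cons d rest ih =>
    rw [List.foldl_cons]
    by_cases hdc : d = dc
    · subst hdc
      have hfire : csdBestStep s st d = (d, (i : Int)) := by
        rw [csdBestStep_eq, hown, if_pos]
        refine ⟨by omega, ?_⟩
        rcases hst with rfl | hlt
        · exact Or.inl rfl
        · exact Or.inr (by omega)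
      rw [hfire]
      exact bestFold_absorb s d i rest (fun e hme => by
        by_cases h : e = d
        · subst h; exact Or.inr (le_of_eq hown.symm)
        · rcases hother e (by simp [hme]) h with h' | h'
          · exact Or.inl h'
          · exact Or.inr (le_of_lt h'))
    · have hrest : dc ∈ rest := by
        rcases List.mem_cons.mp hmem with h | h
        · exact absurd h.symm hdc
        · exact h
      refine ih hrest (fun e hme hne' => hother e (by simp [hme]) hne') _ ?_
      rw [csdBestStep_eq]
      split_ifs with hcond
      · rcases hother d (by simp) hdc with h' | h'
        · exact absurd h' hcond.1
        · exact Or.inr h'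
      · exact hst

-- the whole range-loop finds the first significant char's digit
lemma bestFold_some (s : String) (c : Char) (i : Nat) (hc : sig c = true)
    (hi : s.toList[i]? = some c) (hmin : ∀ j < i, ∀ x, s.toList[j]? = some x → sig x = false) :
    (PySem.List.pyRange 1 10 1).foldl (csdBestStep s) (0, -1) =
      ((c.toNat : Int) - 48, (i : Int)) := by
  have hge : 49 ≤ c.toNat := ((sig_iff c).mp hc).1
  have hle : c.toNat ≤ 57 := ((sig_iff c).mp hc).2
  have hrange : PySem.List.pyRange 1 10 1 = [1,2,3,4,5,6,7,8,9] := by decide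
  rw [hrange]
  refine bestFold_wins s _ i _ ?_ (pd_own s c i hc hi hmin) ?_ _ (Or.inl rfl)
  · simp only [List.mem_cons, List.not_mem_nil, or_false]
    omega
  · intro d hdm hne
    simp only [List.mem_cons, List.not_mem_nil, or_false] at hdm
    exact pd_other s c i hc hi hmin d ⟨by omega, by omega⟩ hne

-- the two per-string steps agree on every dict
lemma step_eq (r : PySem.Dict Int Int) (s : String) :
    (if s ≠ "" then csdInner r s.toList else r) =
      (let best := (PySem.List.pyRange 1 10 1).foldl (csdBestStep s) (0, -1)
       if best.1 ≠ 0 then r.insert best.1 (r.getD best.1 0 + 1) else r) := by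
  rcases hfind : s.toList.find? sig with _ | c
  · have hB : (PySem.List.pyRange 1 10 1).foldl (csdBestStep s) (0, -1) = (0, -1) := by
      refine bestFold_none s hfind _ ?_
      intro d hd
      have hr : PySem.List.pyRange 1 10 1 = [1,2,3,4,5,6,7,8,9] := by decide
      rw [hr] at hd
      simp only [List.mem_cons, List.not_mem_nil, or_false] at hd
      exact ⟨by omega, by omega⟩
    rw [hB, csdInner_eq, hfind]
    simp
  · obtain ⟨hc, i, hilen, hgeti, hmin'⟩ := List.find?_eq_some_iff_getElem.mp hfind
    have hi : s.toList[i]? = some c := by rw [List.getElem?_eq_getElem hilen, hgeti]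
    have hmin : ∀ j < i, ∀ x, s.toList[j]? = some x → sig x = false := by
      intro j hj x hx
      have hjlen : j < s.toList.length := by omega
      have := hmin' j hj
      rw [List.getElem?_eq_getElem hjlen] at hx
      have hxe : s.toList[j] = x := Option.some.inj hx
      rw [hxe] at this
      simpa using this
    have hB : (PySem.List.pyRange 1 10 1).foldl (csdBestStep s) (0, -1) =
        ((c.toNat : Int) - 48, (i : Int)) := bestFold_some s c i hc hi hmin
    have hge : 49 ≤ c.toNat := ((sig_iff c).mp hc).1
    have hsne : s ≠ "" := by
      intro he
      rw [he] at hfind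
      simp at hfind
    rw [hB, csdInner_eq, hfind, if_pos hsne]
    have hnz : ((c.toNat : Int) - 48) ≠ 0 := by omega
    simp [hnz]

-- ===== VERDICT (by name: the statement is the Claim_ definition above) =====
theorem count_start_digits_spec : Claim_equal_count_start_digits := by
  intro l _
  unfold Spec_count_start_digits count_start_digits count_start_digits_alt
  have hinit : PySem.Dict.ofList [((1:Int),(0:Int)),(2,0),(3,0),(4,0),(5,0),(6,0),(7,0),(8,0),(9,0)]
      = (PySem.List.pyRange 1 10 1).foldl (fun r d => r.insert d 0) (PySem.Dict.mk []) := by decide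
  rw [hinit]
  exact congrArg PySem.Dict.items (List.foldl_ext _ _ _ (fun r s _ => step_eq r s))
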